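-- pv_equiv track=rewrite | github.com/JoaoAreias/Youtube | codeforces/MaratonaMineira2022/D/D.py | is_collapsed
-- ===== SOURCE A (Python) =====
-- def fill_prefix_sum(country: list[list[int]], t: int) -> list[list[int]]:
--     n, m = len(country), len(country[0])
--     prefix_sum = [[0 for _ in range(m)] for _ in range(n)]
--
--     prefix_sum[0][0] = int(country[0][0] <= t)
--
--     for i in range(1, n):
--         prefix_sum[i][0] = prefix_sum[i-1][0] + int(country[i][0] <= t)
--
--     for j in range(1, m):
--         prefix_sum[0][j] = prefix_sum[0][j-1] + int(country[0][j] <= t)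
--
--     for i in range(1, n):
--         for j in range(1, m):
--             prefix_sum[i][j] = int(country[i][j] <= t) + \
--                                 prefix_sum[i-1][j] + \
--                                 prefix_sum[i][j-1] - \
--                                 prefix_sum[i-1][j-1]
--     return prefix_sum
--
-- def get_sum(prefix_sum: list[list[int]], i: int, j: int, window_size: int) -> int:
--     top, left = i - window_size, j - window_size
--     sum = prefix_sum[i][j]
--
--     if top >= 0:
--         sum -= prefix_sum[top][j]
--
--     if left >= 0:
--         sum -= prefix_sum[i][left]
--
--     if top >= 0 and left >= 0:
--         sum += prefix_sum[top][left]
--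
--     return sum
--
-- def is_collapsed(country: list[list[int]], t: int, window_size: int) -> bool:
--     n, m = len(country), len(country[0])
--     window_size_sq = window_size * window_size
--     prefix_sum = fill_prefix_sum(country, t)
--     for i in range(window_size - 1, n):
--         for j in range(window_size - 1, m):
--             if get_sum(prefix_sum, i, j, window_size) == window_size_sq:
--                 return True
--     return False
-- ===== SOURCE B (Python) =====
-- def is_collapsed(country: list[list[int]], t: int, window_size: int) -> bool:
--     n, m = len(country), len(country[0])
--     for i in range(n - window_size + 1):
--         for j in range(m - window_size + 1):
--             if all(country[i + a][j + b] <= t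
--                    for a in range(window_size) for b in range(window_size)):
--                 return True
--     return False
-- ===== Notes on version B (the rewrite author's own statement) =====
-- stated objective: simpler
-- what changed: Replaces the 2D prefix-sum table plus window-sum scan by a direct scan over all window top-left corners that checks the window's cells and stops at the first all-good window, removing the table entirely.
-- outside the precondition, e.g. on is_collapsed([[-1, 0], [2, 1]], 0, -1): A returns True, B returns True; on is_collapsed([[0]], 0, -1): A raises IndexError, B returns True
import Mathlib
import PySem

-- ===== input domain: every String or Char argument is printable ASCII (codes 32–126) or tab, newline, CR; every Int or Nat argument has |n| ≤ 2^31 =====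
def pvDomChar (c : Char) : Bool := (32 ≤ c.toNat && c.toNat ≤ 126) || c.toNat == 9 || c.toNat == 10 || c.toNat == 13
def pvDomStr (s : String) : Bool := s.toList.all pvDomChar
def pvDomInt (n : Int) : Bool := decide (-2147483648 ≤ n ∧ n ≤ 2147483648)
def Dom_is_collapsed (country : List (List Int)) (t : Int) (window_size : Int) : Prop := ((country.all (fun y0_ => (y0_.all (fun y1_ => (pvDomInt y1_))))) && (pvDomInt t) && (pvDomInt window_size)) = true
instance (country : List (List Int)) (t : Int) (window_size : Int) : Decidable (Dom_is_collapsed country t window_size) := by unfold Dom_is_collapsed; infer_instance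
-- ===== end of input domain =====

-- B replaces A's prefix-sum table + window-sum scan by a direct scan of all window corners
-- checking each cell (simpler, no table); equivalence is proved on Pre_ (return value only).

-- ===== PORT A =====
-- int(country[i][j] <= t)
def pvInd (country : List (List Int)) (t : Int) (i j : Nat) : Int :=
  if (country.getD i []).getD j 0 ≤ t then 1 else 0

-- the two 1-D initialisation loops of fill_prefix_sum ('for i in range(1, n)' over column 0,
-- and 'for j in range(1, m)' over row 0): each new entry = previous entry + indicator
def pvLine (ind : Nat → Int) (acc : List Int) (i n : Nat) : List Int :=
  if _ : i < n then pvLine ind (acc ++ [acc.getD (i - 1) 0 + ind i]) (i + 1) n else acc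
termination_by n - i

-- inner loop 'for j in range(1, m)' of fill_prefix_sum (row i, given the finished row i-1)
def pvRow (ind : Nat → Int) (prev cur : List Int) (j m : Nat) : List Int :=
  if _ : j < m then
    pvRow ind prev
      (cur ++ [ind j + prev.getD j 0 + cur.getD (j - 1) 0 - prev.getD (j - 1) 0]) (j + 1) m
  else cur
termination_by m - j

-- outer loop 'for i in range(1, n)' of fill_prefix_sum; row i starts from prefix_sum[i][0]
def pvRows (country : List (List Int)) (t : Int) (col0 : List Int)
    (rows : List (List Int)) (prev : List Int) (i n m : Nat) : List (List Int) :=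
  if _ : i < n then
    pvRows country t col0
      (rows ++ [pvRow (pvInd country t i) prev [col0.getD i 0] 1 m])
      (pvRow (pvInd country t i) prev [col0.getD i 0] 1 m) (i + 1) n m
  else rows
termination_by n - i

def fill_prefix_sum_port (country : List (List Int)) (t : Int) : List (List Int) :=
  let n := country.length
  let m := (country.headD []).length
  let col0 := pvLine (fun i => pvInd country t i 0) [pvInd country t 0 0] 1 n
  let row0 := pvLine (fun j => pvInd country t 0 j) [pvInd country t 0 0] 1 m
  pvRows country t col0 [row0] row0 1 n m

def get_sum_port (ps : List (List Int)) (i j window_size : Int) : Int :=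
  let top := i - window_size
  let left := j - window_size
  let s0 := PySem.List.pyGetD (PySem.List.pyGetD ps i []) j 0
  let s1 := if 0 ≤ top then s0 - PySem.List.pyGetD (PySem.List.pyGetD ps top []) j 0 else s0
  let s2 := if 0 ≤ left then s1 - PySem.List.pyGetD (PySem.List.pyGetD ps i []) left 0 else s1
  if 0 ≤ top ∧ 0 ≤ left then s2 + PySem.List.pyGetD (PySem.List.pyGetD ps top []) left 0 else s2

def is_collapsed (country : List (List Int)) (t : Int) (window_size : Int) : Bool :=
  let n : Int := country.length
  let m : Int := (country.headD []).length
  let wsq := window_size * window_size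
  let ps := fill_prefix_sum_port country t
  (PySem.List.pyRange (window_size - 1) n 1).any fun i =>
    (PySem.List.pyRange (window_size - 1) m 1).any fun j =>
      get_sum_port ps i j window_size == wsq

-- ===== PORT B =====
def is_collapsed_alt (country : List (List Int)) (t : Int) (window_size : Int) : Bool :=
  let n : Int := country.length
  let m : Int := (country.headD []).length
  (PySem.List.pyRange 0 (n - window_size + 1) 1).any fun i =>
    (PySem.List.pyRange 0 (m - window_size + 1) 1).any fun j =>
      (PySem.List.pyRange 0 window_size 1).all fun a =>
        (PySem.List.pyRange 0 window_size 1).all fun b =>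
          decide (PySem.List.pyGetD (PySem.List.pyGetD country (i + a) []) (j + b) 0 ≤ t)

-- ===== PRECONDITION & SPEC =====
-- Pre_ restricts to the natural domain of the task: a non-empty grid whose rows all reach the
-- first row's positive width, and a non-negative window.  Outside it A raises IndexError (empty
-- grid, zero-width first row, a row shorter than the first, and most window_size < 0 inputs)
-- or, for the remaining negative window sizes, returns True only through Python negative-index
-- wraparound into the prefix table.
def Pre_is_collapsed (country : List (List Int)) (t : Int) (window_size : Int) : Prop :=
  country ≠ [] ∧ 0 < (country.headD []).length ∧
    (∀ row ∈ country, (country.headD []).length ≤ row.length) ∧ 0 ≤ window_size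
instance (country : List (List Int)) (t : Int) (window_size : Int) : Decidable (Pre_is_collapsed country t window_size) := by unfold Pre_is_collapsed; infer_instance

def pvWitness_is_collapsed : List (List Int) × Int × Int := ([[1, 2], [3, 4]], 2, 1)

def Spec_is_collapsed (country : List (List Int)) (t : Int) (window_size : Int) (out : Bool) : Prop := out = is_collapsed_alt country t window_size
instance (country : List (List Int)) (t : Int) (window_size : Int) (out : Bool) : Decidable (Spec_is_collapsed country t window_size out) := by unfold Spec_is_collapsed; infer_instance

-- ===== CLAIM (what is proved, stated in full; the proofs are below) =====
def Claim_equal_is_collapsed : Prop := ∀ (country : List (List Int)) (t : Int) (window_size : Int), Dom_is_collapsed country t window_size → Pre_is_collapsed country t window_size → Spec_is_collapsed country t window_size (is_collapsed country t window_size)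

-- ===== LEMMAS AND PROOFS =====

-- count of good cells in the index rectangle [0,u) × [0,v)
def pvC (c : List (List Int)) (t : Int) (u v : Nat) : Int :=
  ∑ a ∈ Finset.range u, ∑ b ∈ Finset.range v, pvInd c t a b

-- 'some w×w all-good window fits in the n×m grid'
def HasWindow (c : List (List Int)) (t : Int) (w n m : Nat) : Prop :=
  ∃ r s : Nat, r + w ≤ n ∧ s + w ≤ m ∧
    ∀ a < w, ∀ b < w, (c.getD (r + a) []).getD (s + b) 0 ≤ t

lemma pvC_zero_left (c : List (List Int)) (t : Int) (v : Nat) : pvC c t 0 v = 0 := by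
  simp [pvC]

lemma pvC_zero_right (c : List (List Int)) (t : Int) (u : Nat) : pvC c t u 0 = 0 := by
  simp [pvC]

lemma pvC_succ_succ (c : List (List Int)) (t : Int) (u v : Nat) :
    pvC c t (u + 1) (v + 1)
      = pvC c t u (v + 1) + pvC c t (u + 1) v - pvC c t u v + pvInd c t u v := by
  simp [pvC, Finset.sum_range_succ]; ring

lemma pvC_col_succ (c : List (List Int)) (t : Int) (k : Nat) :
    pvC c t (k + 2) 1 = pvC c t (k + 1) 1 + pvInd c t (k + 1) 0 := by
  simp [pvC, Finset.sum_range_succ]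

lemma pvC_row_succ (c : List (List Int)) (t : Int) (k : Nat) :
    pvC c t 1 (k + 2) = pvC c t 1 (k + 1) + pvInd c t 0 (k + 1) := by
  simp [pvC, Finset.sum_range_succ]

lemma pvC_one_one (c : List (List Int)) (t : Int) : pvC c t 1 1 = pvInd c t 0 0 := by
  simp [pvC]

lemma getD_append_lt {α : Type} (l : List α) (x d : α) (k : Nat) (h : k < l.length) :
    (l ++ [x]).getD k d = l.getD k d := by
  simp [List.getD, List.getElem?_append_left h]

lemma getD_append_self {α : Type} (l : List α) (x d : α) :
    (l ++ [x]).getD l.length d = x := by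
  simp [List.getD]

lemma pvLine_spec (ind : Nat → Int) (f : Nat → Int)
    (hf : ∀ k, f (k + 1) = f k + ind (k + 1)) (n : Nat) :
    ∀ d i acc, n - i = d → 1 ≤ i → acc.length = i → (∀ k, k < i → acc.getD k 0 = f k) →
      (pvLine ind acc i n).length = max i n ∧
        ∀ k, k < max i n → (pvLine ind acc i n).getD k 0 = f k := by
  intro d
  induction d with
  | zero =>
    intro i acc hd h1 h2 h3
    rw [pvLine, dif_neg (by omega)]
    exact ⟨by omega, fun k hk => h3 k (by omega)⟩
  | succ d ih =>
    intro i acc hd h1 h2 h3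
    have hin : i < n := by omega
    rw [pvLine, dif_pos hin]
    have hx : acc.getD (i - 1) 0 + ind i = f i := by
      rw [h3 (i - 1) (by omega)]
      obtain ⟨k, hk⟩ : ∃ k, i = k + 1 := ⟨i - 1, by omega⟩
      subst hk
      simp [hf k]
    have hres := ih (i + 1) (acc ++ [acc.getD (i - 1) 0 + ind i]) (by omega) (by omega)
      (by simp [h2])
      (by
        intro k hk
        rcases Nat.lt_or_ge k i with hk' | hk'
        · rw [getD_append_lt _ _ _ _ (by omega), h3 k hk']
        · have hk0 : k = i := by omega
          subst hk0
          rw [← h2, getD_append_self, h2]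
          exact hx)
    exact ⟨by rw [hres.1]; omega, fun k hk => hres.2 k (by omega)⟩

lemma pvRow_spec (ind : Nat → Int) (prev : List Int) (fp fr : Nat → Int) (m : Nat)
    (hprev : ∀ k, k < m → prev.getD k 0 = fp k)
    (hrec : ∀ j, j + 1 < m → fr (j + 1) = ind (j + 1) + fp (j + 1) + fr j - fp j) :
    ∀ d j cur, m - j = d → 1 ≤ j → cur.length = j → (∀ k, k < j → cur.getD k 0 = fr k) →
      (pvRow ind prev cur j m).length = max j m ∧
        ∀ k, k < max j m → (pvRow ind prev cur j m).getD k 0 = fr k := by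
  intro d
  induction d with
  | zero =>
    intro j cur hd h1 h2 h3
    rw [pvRow, dif_neg (by omega)]
    exact ⟨by omega, fun k hk => h3 k (by omega)⟩
  | succ d ih =>
    intro j cur hd h1 h2 h3
    have hjm : j < m := by omega
    rw [pvRow, dif_pos hjm]
    have hx : ind j + prev.getD j 0 + cur.getD (j - 1) 0 - prev.getD (j - 1) 0 = fr j := by
      rw [hprev j hjm, h3 (j - 1) (by omega), hprev (j - 1) (by omega)]
      obtain ⟨k, hk⟩ : ∃ k, j = k + 1 := ⟨j - 1, by omega⟩
      subst hk
      rw [hrec k hjm]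
      simp
    have hres := ih (j + 1)
      (cur ++ [ind j + prev.getD j 0 + cur.getD (j - 1) 0 - prev.getD (j - 1) 0])
      (by omega) (by omega) (by simp [h2])
      (by
        intro k hk
        rcases Nat.lt_or_ge k j with hk' | hk'
        · rw [getD_append_lt _ _ _ _ (by omega), h3 k hk']
        · have hk0 : k = j := by omega
          subst hk0
          rw [← h2, getD_append_self, h2]
          exact hx)
    exact ⟨by rw [hres.1]; omega, fun k hk => hres.2 k (by omega)⟩

-- row r of the finished table: length m, entries pvC (r+1) (k+1)
def RowOK (c : List (List Int)) (t : Int) (m : Nat) (row : List Int) (r : Nat) : Prop :=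
  row.length = m ∧ ∀ k, k < m → row.getD k 0 = pvC c t (r + 1) (k + 1)

lemma pvRows_spec (c : List (List Int)) (t : Int) (col0 : List Int) (n m : Nat)
    (hm : 1 ≤ m) (hcol : ∀ r, r < n → col0.getD r 0 = pvC c t (r + 1) 1) :
    ∀ d i rows prev, n - i = d → 1 ≤ i → rows.length = i →
      (∀ r, r < i → RowOK c t m (rows.getD r []) r) → RowOK c t m prev (i - 1) →
      (pvRows c t col0 rows prev i n m).length = max i n ∧
        ∀ r, r < max i n → RowOK c t m ((pvRows c t col0 rows prev i n m).getD r []) r := by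
  intro d
  induction d with
  | zero =>
    intro i rows prev hd h1 h2 h3 _
    rw [pvRows, dif_neg (by omega)]
    exact ⟨by omega, fun r hr => h3 r (by omega)⟩
  | succ d ih =>
    intro i rows prev hd h1 h2 h3 hprev
    have hin : i < n := by omega
    rw [pvRows, dif_pos hin]
    have hrow : RowOK c t m (pvRow (pvInd c t i) prev [col0.getD i 0] 1 m) i := by
      have hr := pvRow_spec (pvInd c t i) prev
        (fun k => pvC c t i (k + 1)) (fun k => pvC c t (i + 1) (k + 1)) m
        (by
          intro k hk
          have := hprev.2 k hk
          rwa [show i - 1 + 1 = i by omega] at this)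
        (by
          intro k _
          have h := pvC_succ_succ c t i (k + 1)
          simp only []
          linarith)
        (m - 1) 1 [col0.getD i 0] (by omega) (by omega) (by simp)
        (by
          intro k hk
          have hk0 : k = 0 := by omega
          subst hk0
          show [col0.getD i 0].getD 0 0 = pvC c t (i + 1) 1
          simpa using hcol i hin)
      exact ⟨by rw [hr.1]; omega, fun k hk => hr.2 k (by omega)⟩
    have hres := ih (i + 1)
      (rows ++ [pvRow (pvInd c t i) prev [col0.getD i 0] 1 m])
      (pvRow (pvInd c t i) prev [col0.getD i 0] 1 m)
      (by omega) (by omega) (by simp [h2])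
      (by
        intro r hr
        rcases Nat.lt_or_ge r i with hr' | hr'
        · rw [getD_append_lt _ _ _ _ (by omega)]
          exact h3 r hr'
        · have hr0 : r = i := by omega
          subst hr0
          rw [← h2, getD_append_self, h2]
          exact hrow)
      (by simpa using hrow)
    exact ⟨by rw [hres.1]; omega, fun r hr => hres.2 r (by omega)⟩

lemma fps_spec (c : List (List Int)) (t : Int) (hne : c ≠ [])
    (hm : 0 < (c.headD []).length) :
    ∀ i j, i < c.length → j < (c.headD []).length →
      ((fill_prefix_sum_port c t).getD i []).getD j 0 = pvC c t (i + 1) (j + 1) := by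
  intro i j hi hj
  have hn : 1 ≤ c.length := by cases c <;> simp_all
  unfold fill_prefix_sum_port
  have hcol := pvLine_spec (fun i => pvInd c t i 0) (fun r => pvC c t (r + 1) 1)
    (by intro k; exact pvC_col_succ c t k) c.length (c.length - 1) 1 [pvInd c t 0 0]
    (by omega) (by omega) (by simp) (by
      intro k hk
      have hk0 : k = 0 := by omega
      subst hk0
      simp [pvC_one_one])
  have hrow0 := pvLine_spec (fun j => pvInd c t 0 j) (fun k => pvC c t 1 (k + 1))
    (by intro k; exact pvC_row_succ c t k) (c.headD []).length
    ((c.headD []).length - 1) 1 [pvInd c t 0 0]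
    (by omega) (by omega) (by simp) (by
      intro k hk
      have hk0 : k = 0 := by omega
      subst hk0
      simp [pvC_one_one])
  have hrows := pvRows_spec c t
    (pvLine (fun i => pvInd c t i 0) [pvInd c t 0 0] 1 c.length)
    c.length (c.headD []).length hm
    (by intro r hr; exact hcol.2 r (by omega))
    (c.length - 1) 1
    [pvLine (fun j => pvInd c t 0 j) [pvInd c t 0 0] 1 (c.headD []).length]
    (pvLine (fun j => pvInd c t 0 j) [pvInd c t 0 0] 1 (c.headD []).length)
    (by omega) (by omega) (by simp)
    (by
      intro r hr
      have hr0 : r = 0 := by omega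
      subst hr0
      rw [show [pvLine (fun j => pvInd c t 0 j) [pvInd c t 0 0] 1 (c.headD []).length].getD 0 []
          = pvLine (fun j => pvInd c t 0 j) [pvInd c t 0 0] 1 (c.headD []).length from by simp]
      exact ⟨by rw [hrow0.1]; omega, fun k hk => by
        simpa using hrow0.2 k (by omega)⟩)
    (⟨by rw [hrow0.1]; omega, fun k hk => by simpa using hrow0.2 k (by omega)⟩)
  exact (hrows.2 i (by omega)).2 j hj

-- inclusion–exclusion for a rectangular block of a double sum
lemma pvIE (f : Nat → Nat → Int) (u1 u2 v1 v2 : Nat) (h1 : u1 ≤ u2) (h2 : v1 ≤ v2) :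
    ∑ a ∈ Finset.Ico u1 u2, ∑ b ∈ Finset.Ico v1 v2, f a b
      = (∑ a ∈ Finset.range u2, ∑ b ∈ Finset.range v2, f a b)
        - (∑ a ∈ Finset.range u1, ∑ b ∈ Finset.range v2, f a b)
        - (∑ a ∈ Finset.range u2, ∑ b ∈ Finset.range v1, f a b)
        + (∑ a ∈ Finset.range u1, ∑ b ∈ Finset.range v1, f a b) := by
  simp only [Finset.sum_Ico_eq_sub _ h2, Finset.sum_sub_distrib, Finset.sum_Ico_eq_sub _ h1]
  ring

lemma get_sum_eq (c : List (List Int)) (t : Int) (hne : c ≠ [])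
    (hm : 0 < (c.headD []).length) (w i j : Int) (hw : 1 ≤ w)
    (hi1 : w - 1 ≤ i) (hi2 : i < c.length)
    (hj1 : w - 1 ≤ j) (hj2 : j < (c.headD []).length) :
    get_sum_port (fill_prefix_sum_port c t) i j w
      = ∑ a ∈ Finset.Ico ((i + 1 - w).toNat) (i.toNat + 1),
          ∑ b ∈ Finset.Ico ((j + 1 - w).toNat) (j.toNat + 1), pvInd c t a b := by
  have hi0 : 0 ≤ i := by omega
  have hj0 : 0 ≤ j := by omega
  have hiN : i.toNat < c.length := by omega
  have hjN : j.toNat < (c.headD []).length := by omega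
  rw [pvIE (pvInd c t) _ _ _ _ (by omega) (by omega)]
  show get_sum_port _ _ _ _ = pvC c t (i.toNat + 1) (j.toNat + 1)
      - pvC c t (i + 1 - w).toNat (j.toNat + 1)
      - pvC c t (i.toNat + 1) (j + 1 - w).toNat
      + pvC c t (i + 1 - w).toNat (j + 1 - w).toNat
  simp only [get_sum_port]
  by_cases htop : 0 ≤ i - w
  · have e1 : (i + 1 - w).toNat = (i - w).toNat + 1 := by omega
    by_cases hleft : 0 ≤ j - w
    · have e2 : (j + 1 - w).toNat = (j - w).toNat + 1 := by omega
      simp only [if_pos htop, if_pos hleft, if_pos (And.intro htop hleft)]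
      simp only [PySem.List.pyGetD_of_nonneg _ _ hi0, PySem.List.pyGetD_of_nonneg _ _ htop,
        PySem.List.pyGetD_of_nonneg _ _ hj0, PySem.List.pyGetD_of_nonneg _ _ hleft]
      rw [fps_spec c t hne hm i.toNat j.toNat hiN hjN,
        fps_spec c t hne hm (i - w).toNat j.toNat (by omega) hjN,
        fps_spec c t hne hm i.toNat (j - w).toNat hiN (by omega),
        fps_spec c t hne hm (i - w).toNat (j - w).toNat (by omega) (by omega), e1, e2]
    · have e2 : (j + 1 - w).toNat = 0 := by omega
      simp only [if_pos htop, if_neg hleft,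
        if_neg (show ¬(0 ≤ i - w ∧ 0 ≤ j - w) from by tauto)]
      simp only [PySem.List.pyGetD_of_nonneg _ _ hi0, PySem.List.pyGetD_of_nonneg _ _ htop,
        PySem.List.pyGetD_of_nonneg _ _ hj0]
      rw [fps_spec c t hne hm i.toNat j.toNat hiN hjN,
        fps_spec c t hne hm (i - w).toNat j.toNat (by omega) hjN, e1, e2,
        pvC_zero_right, pvC_zero_right]
      ring
  · have e1 : (i + 1 - w).toNat = 0 := by omega
    by_cases hleft : 0 ≤ j - w
    · have e2 : (j + 1 - w).toNat = (j - w).toNat + 1 := by omega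
      simp only [if_neg htop, if_pos hleft,
        if_neg (show ¬(0 ≤ i - w ∧ 0 ≤ j - w) from by tauto)]
      simp only [PySem.List.pyGetD_of_nonneg _ _ hi0, PySem.List.pyGetD_of_nonneg _ _ hj0,
        PySem.List.pyGetD_of_nonneg _ _ hleft]
      rw [fps_spec c t hne hm i.toNat j.toNat hiN hjN,
        fps_spec c t hne hm i.toNat (j - w).toNat hiN (by omega), e1, e2,
        pvC_zero_left, pvC_zero_left]
      ring
    · have e2 : (j + 1 - w).toNat = 0 := by omega
      simp only [if_neg htop, if_neg hleft,
        if_neg (show ¬(0 ≤ i - w ∧ 0 ≤ j - w) from by tauto)]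
      simp only [PySem.List.pyGetD_of_nonneg _ _ hi0, PySem.List.pyGetD_of_nonneg _ _ hj0]
      rw [fps_spec c t hne hm i.toNat j.toNat hiN hjN, e1, e2,
        pvC_zero_left, pvC_zero_left, pvC_zero_right]
      ring

lemma sum_boole_eq_card_iff {α : Type} (S : Finset α) (p : α → Prop) [DecidablePred p] :
    (∑ x ∈ S, if p x then (1 : Int) else 0) = S.card ↔ ∀ x ∈ S, p x := by
  rw [Finset.sum_boole, Nat.cast_inj, Finset.card_filter_eq_iff]

lemma window_sum_eq_sq_iff (c : List (List Int)) (t : Int) (r s w : Nat) :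
    (∑ a ∈ Finset.Ico r (r + w), ∑ b ∈ Finset.Ico s (s + w), pvInd c t a b)
        = (w : Int) * (w : Int)
      ↔ ∀ a < w, ∀ b < w, (c.getD (r + a) []).getD (s + b) 0 ≤ t := by
  rw [← Finset.sum_product']
  have hcard : ((Finset.Ico r (r + w)) ×ˢ (Finset.Ico s (s + w))).card = w * w := by
    simp [Finset.card_product]
  have := sum_boole_eq_card_iff ((Finset.Ico r (r + w)) ×ˢ (Finset.Ico s (s + w)))
    (fun x => (c.getD x.1 []).getD x.2 0 ≤ t)
  rw [hcard] at this
  push_cast at this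
  rw [show (∑ x ∈ (Finset.Ico r (r + w)) ×ˢ (Finset.Ico s (s + w)), pvInd c t x.1 x.2)
      = ∑ x ∈ (Finset.Ico r (r + w)) ×ˢ (Finset.Ico s (s + w)),
          if (c.getD x.1 []).getD x.2 0 ≤ t then (1 : Int) else 0 by
    apply Finset.sum_congr rfl; intro x _; rfl]
  rw [this]
  constructor
  · intro h a ha b hb
    exact h (r + a, s + b) (by simp [Finset.mem_product, Finset.mem_Ico]; omega)
  · intro h x hx
    simp [Finset.mem_product, Finset.mem_Ico] at hx
    have := h (x.1 - r) (by omega) (x.2 - s) (by omega)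
    rwa [show r + (x.1 - r) = x.1 by omega, show s + (x.2 - s) = x.2 by omega] at this

lemma A_iff (c : List (List Int)) (t w : Int) (hne : c ≠ [])
    (hm : 0 < (c.headD []).length) (hw : 1 ≤ w) :
    is_collapsed c t w = true
      ↔ HasWindow c t w.toNat c.length (c.headD []).length := by
  unfold is_collapsed
  simp only [List.any_eq_true, PySem.List.mem_pyRange_one, beq_iff_eq]
  constructor
  · rintro ⟨i, ⟨hi1, hi2⟩, j, ⟨hj1, hj2⟩, hsum⟩
    rw [get_sum_eq c t hne hm w i j hw hi1 hi2 hj1 hj2] at hsum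
    refine ⟨(i + 1 - w).toNat, (j + 1 - w).toNat, by omega, by omega, ?_⟩
    rw [← window_sum_eq_sq_iff]
    rw [show (i + 1 - w).toNat + w.toNat = i.toNat + 1 by omega,
      show (j + 1 - w).toNat + w.toNat = j.toNat + 1 by omega]
    rw [hsum]
    have : ((w.toNat : Int)) = w := by omega
    rw [this]
  · rintro ⟨r, s, hr, hs, hall⟩
    refine ⟨(r : Int) + w - 1, ⟨by omega, by omega⟩, (s : Int) + w - 1, ⟨by omega, by omega⟩, ?_⟩
    rw [get_sum_eq c t hne hm w _ _ hw (by omega) (by omega) (by omega) (by omega)]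
    rw [show ((r : Int) + w - 1 + 1 - w).toNat = r by omega,
      show ((s : Int) + w - 1 + 1 - w).toNat = s by omega,
      show ((r : Int) + w - 1).toNat + 1 = r + w.toNat by omega,
      show ((s : Int) + w - 1).toNat + 1 = s + w.toNat by omega]
    rw [window_sum_eq_sq_iff c t r s w.toNat |>.mpr hall]
    have : ((w.toNat : Int)) = w := by omega
    rw [this]

lemma B_iff (c : List (List Int)) (t w : Int) (hw : 1 ≤ w) :
    is_collapsed_alt c t w = true
      ↔ HasWindow c t w.toNat c.length (c.headD []).length := by
  unfold is_collapsed_alt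
  simp only [List.any_eq_true, List.all_eq_true, PySem.List.mem_pyRange_one,
    decide_eq_true_eq]
  constructor
  · rintro ⟨i, ⟨hi1, hi2⟩, j, ⟨hj1, hj2⟩, hall⟩
    refine ⟨i.toNat, j.toNat, by omega, by omega, ?_⟩
    intro a ha b hb
    have := hall (a : Int) ⟨by omega, by omega⟩ (b : Int) ⟨by omega, by omega⟩
    rwa [PySem.List.pyGetD_of_nonneg _ _ (show (0:Int) ≤ i + a by omega),
      PySem.List.pyGetD_of_nonneg _ _ (show (0:Int) ≤ j + b by omega),
      show (i + (a : Int)).toNat = i.toNat + a by omega,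
      show (j + (b : Int)).toNat = j.toNat + b by omega] at this
  · rintro ⟨r, s, hr, hs, hall⟩
    refine ⟨(r : Int), ⟨by omega, by omega⟩, (s : Int), ⟨by omega, by omega⟩, ?_⟩
    rintro a ⟨ha1, ha2⟩ b ⟨hb1, hb2⟩
    have := hall a.toNat (by omega) b.toNat (by omega)
    simp only [PySem.List.pyGetD_of_nonneg _ _ (show (0:Int) ≤ (r : Int) + a by omega),
      PySem.List.pyGetD_of_nonneg _ _ (show (0:Int) ≤ (s : Int) + b by omega),
      show ((r : Int) + a).toNat = r + a.toNat by omega,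
      show ((s : Int) + b).toNat = s + b.toNat by omega]
    exact this

-- at window_size = 0 A's scan hits (i, j) = (-1, 0) where the two wrapped reads cancel to 0 = 0²
lemma A_zero (c : List (List Int)) (t : Int) (hne : c ≠ [])
    (hm : 0 < (c.headD []).length) : is_collapsed c t 0 = true := by
  have hn := List.length_pos_of_ne_nil hne
  unfold is_collapsed
  simp only [List.any_eq_true, PySem.List.mem_pyRange_one, beq_iff_eq]
  refine ⟨-1, ⟨by omega, by omega⟩, 0, ⟨by omega, by omega⟩, ?_⟩
  simp only [get_sum_port]
  norm_num

lemma B_zero (c : List (List Int)) (t : Int) : is_collapsed_alt c t 0 = true := by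
  unfold is_collapsed_alt
  simp only [List.any_eq_true, List.all_eq_true, PySem.List.mem_pyRange_one]
  exact ⟨0, ⟨by omega, by omega⟩, 0, ⟨by omega, by omega⟩,
    by rintro a ⟨h1, h2⟩; omega⟩

-- ===== VERDICT (by name: the statement is the Claim_ definition above) =====
theorem is_collapsed_spec : Claim_equal_is_collapsed := by
  intro c t w _ hpre
  obtain ⟨hne, hm, _, hw0⟩ := hpre
  show is_collapsed c t w = is_collapsed_alt c t w
  rcases eq_or_lt_of_le hw0 with h0 | hw
  · rw [← h0, A_zero c t hne hm, B_zero c t]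
  · have h := (A_iff c t w hne hm (by omega)).trans (B_iff c t w (by omega)).symm
    cases hA : is_collapsed c t w <;> cases hB : is_collapsed_alt c t w <;> simp_all
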